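-- pv_equiv track=rewrite | github.com/pypi-data/pypi-mirror-396 | packages/dapu/dapu-0.7.11-py3-none-any.whl/dapu/perks.py | prepare_schema_name
-- ===== SOURCE A (Python) =====
-- def prepare_schema_name(schema_name: str) -> str:
--     eliminate_list: list[str] = ["'", '"', ":", ".", ";", "?"]
--     if not schema_name:
--         return ""
--     schema_name = schema_name.strip()
--     for elim in eliminate_list:
--         schema_name = schema_name.replace(elim, "")
--     return schema_name
-- ===== SOURCE B (Python) =====
-- def prepare_schema_name(schema_name: str) -> str:
--     if not schema_name:
--         return ""
--     bad = {"'", '"', ":", ".", ";", "?"}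
--     return "".join(c for c in schema_name.strip() if c not in bad)
-- ===== Notes on version B (the rewrite author's own statement) =====
-- stated objective: simpler
-- what changed: Replaces A's six sequential full-string replace passes with a single character-level filtering pass over the stripped string, keeping characters not in the eliminated set.
import Mathlib
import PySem

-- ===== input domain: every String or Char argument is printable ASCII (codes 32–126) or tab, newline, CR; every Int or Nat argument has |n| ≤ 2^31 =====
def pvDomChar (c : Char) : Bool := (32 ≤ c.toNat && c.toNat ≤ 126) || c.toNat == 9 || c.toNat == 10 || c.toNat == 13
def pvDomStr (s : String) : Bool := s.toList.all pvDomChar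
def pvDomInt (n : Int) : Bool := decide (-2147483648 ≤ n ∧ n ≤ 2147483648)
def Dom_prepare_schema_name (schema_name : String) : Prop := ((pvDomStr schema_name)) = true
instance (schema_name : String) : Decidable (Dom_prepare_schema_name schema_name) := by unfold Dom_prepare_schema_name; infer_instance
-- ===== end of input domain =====

-- B replaces A's six sequential full-string replace passes with one character-level
-- filtering pass over the stripped string (objective: simpler).

-- ===== PORT A =====
def prepare_schema_name (schema_name : String) : String :=
  let eliminate_list : List String := ["'", "\"", ":", ".", ";", "?"]
  if schema_name == "" then ""
  else
    let s := PySem.Str.strip schema_name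
    eliminate_list.foldl (fun acc elim => PySem.Str.replace acc elim "") s

-- ===== PORT B =====
def prepare_schema_name_alt (schema_name : String) : String :=
  if schema_name == "" then ""
  else
    let bad : List Char := ['\'', '"', ':', '.', ';', '?']
    String.ofList ((PySem.Str.strip schema_name).toList.filter (fun c => !(bad.contains c)))

-- ===== PRECONDITION & SPEC =====
def Spec_prepare_schema_name (schema_name : String) (out : String) : Prop := out = prepare_schema_name_alt schema_name
instance (schema_name : String) (out : String) : Decidable (Spec_prepare_schema_name schema_name out) := by unfold Spec_prepare_schema_name; infer_instance

-- ===== CLAIM (what is proved, stated in full; the proofs are below) =====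
def Claim_equal_prepare_schema_name : Prop := ∀ (schema_name : String), Dom_prepare_schema_name schema_name → Spec_prepare_schema_name schema_name (prepare_schema_name schema_name)

-- ===== LEMMAS AND PROOFS =====

-- Python's s.replace(c, "") for a single character c is a character filter:
-- the fuel-indexed worker of PySem.Chars.replace, specialised to old = [c], new = [].
theorem replace_go_single (c : Char) : ∀ (fuel : Nat) (l acc : List Char), l.length ≤ fuel →
    PySem.Chars.replace.go [c] [] fuel l acc = acc.reverse ++ l.filter (fun a => a != c) := by
  intro fuel
  induction fuel with
  | zero =>
    intro l acc h
    have : l = [] := List.eq_nil_of_length_eq_zero (Nat.le_zero.mp h)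
    subst this
    simp [PySem.Chars.replace.go]
  | succ n ih =>
    intro l acc h
    cases l with
    | nil => simp [PySem.Chars.replace.go]
    | cons a t =>
      by_cases hac : a = c
      · subst hac
        have hpre : List.isPrefixOf [a] (a :: t) = true := by simp [List.isPrefixOf]
        rw [PySem.Chars.replace.go]
        simp only [hpre, if_true]
        rw [ih]
        · simp
        · simpa using Nat.le_of_succ_le_succ h
      · have hpre : List.isPrefixOf [c] (a :: t) = false := by
          simp [List.isPrefixOf]; exact fun hr => (hac hr.symm).elim
        rw [PySem.Chars.replace.go]
        simp only [hpre]
        rw [ih t (a :: acc) (by simpa using Nat.le_of_succ_le_succ h)]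
        simp [hac]

theorem replace_single (c : Char) (l : List Char) :
    PySem.Chars.replace l [c] [] = l.filter (fun a => a != c) := by
  rw [PySem.Chars.replace]
  simp only [List.isEmpty_cons]
  simpa using replace_go_single c l.length l [] (le_refl _)

-- six single-character filters in sequence = one filter by list membership
theorem six_filters (l : List Char) :
    ((((((l.filter (fun a => a != '\'')).filter (fun a => a != '"')).filter
      (fun a => a != ':')).filter (fun a => a != '.')).filter
      (fun a => a != ';')).filter (fun a => a != '?')) =
    l.filter (fun c => !((['\'', '"', ':', '.', ';', '?'] : List Char).contains c)) := by
  simp only [List.filter_filter]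
  apply List.filter_congr
  intro a _
  rw [Bool.eq_iff_iff]
  simp [bne]
  tauto

-- ===== VERDICT (by name: the statement is the Claim_ definition above) =====
theorem prepare_schema_name_spec : Claim_equal_prepare_schema_name := by
  intro s _
  unfold Spec_prepare_schema_name prepare_schema_name prepare_schema_name_alt
  by_cases h : s = ""
  · simp [h]
  · have hb : (s == "") = false := by simp [h]
    simp only [hb, Bool.false_eq_true, if_false]
    apply String.toList_injective
    have e1 : ("'" : String).toList = ['\''] := rfl
    have e2 : ("\"" : String).toList = ['"'] := rfl
    have e3 : (":" : String).toList = [':'] := rfl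
    have e4 : ("." : String).toList = ['.'] := rfl
    have e5 : (";" : String).toList = [';'] := rfl
    have e6 : ("?" : String).toList = ['?'] := rfl
    have e0 : ("" : String).toList = [] := rfl
    simp only [List.foldl_cons, List.foldl_nil, PySem.Str.toList_replace,
      String.toList_ofList, e1, e2, e3, e4, e5, e6, e0, replace_single]
    exact six_filters _
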